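-- pv_equiv track=rewrite | github.com/Ryss-D/MAPANA | algorithms/painting_a_city.py | paintin_a_city
-- ===== SOURCE A (Python) =====
-- def paintin_a_city(matrix) :
--     n = len(matrix)
--     m = len(matrix[0])
--
--     floor_rooft = (n * m)*2
--     side = []
--     otherside = []
--     front = []
--     back = []
--
--     for i in range(m) :
--         x = []
--         for line in matrix:
--             x.append(line[i])
--         side.append(x[0])
--         for indexe in range(len(x)-1):
--             if x[indexe] < x[indexe + 1]:
--                 side.append(x[indexe+1]-x[indexe])
--             else:
--                 pass
--
--     for i in range(m) :
--         x = []
--         for line in matrix: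
--             x.append(line[i])
--         x.reverse()
--         otherside.append(x[0])
--         for indexe in range(len(x)-1):
--             if x[indexe] < x[indexe + 1]:
--                 otherside.append(x[indexe+1]-x[indexe])
--             else:
--                 pass
--
--     for line in matrix:
--         front.append(line[0])
--         for indexe in range(len(line)-1):
--             if line[indexe] < line[indexe + 1]:
--                 front.append(line[indexe+1]-line[indexe])
--             else:
--                 pass
--
--     for line in matrix:
--         line.reverse()
--         back.append(line[0])
--         for indexe in range(len(line)-1):
--             if line[indexe] < line[indexe + 1]:
--                 back.append(line[indexe+1]-line[indexe])
--             else: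
--                 pass
--
--
--
--     liters = sum(side) + sum(otherside) + sum(front) + sum(back) + floor_rooft
--
--     return liters
-- ===== SOURCE B (Python) =====
-- # Return-value re-implementation: one per-cell pass adding the four directional
-- # exposed faces plus floor+roof. NOTE: A reverses each row of `matrix` in place;
-- # B does not mutate its argument — the equivalence claimed is about the return value only.
-- def paintin_a_city(matrix):
--     n = len(matrix)
--     m = len(matrix[0])
--     total = 2 * n * m
--     for r in range(n):
--         for c in range(m):
--             h = matrix[r][c]
--             total += h if c == 0 else max(0, h - matrix[r][c - 1])
--             total += h if c == m - 1 else max(0, h - matrix[r][c + 1])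
--             total += h if r == 0 else max(0, h - matrix[r - 1][c])
--             total += h if r == n - 1 else max(0, h - matrix[r + 1][c])
--     return total
-- ===== Notes on version B (the rewrite author's own statement) =====
-- stated objective: alternative
-- what changed: Instead of A's four separate passes that extract every column, build four increment lists and sum them, B makes one nested pass over the cells, adding per cell the four directional exposed faces (raw height at a grid boundary, positive clamped difference against the neighbour inside) on top of 2*n*m for floor and roof; B also does not reverse the rows of the input in place as A does, so equivalence is about the return value.
-- outside the precondition, e.g. on paintin_a_city([[1, 2], [3, 4, 5]]): A returns 36, B returns 34
import Mathlib
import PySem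

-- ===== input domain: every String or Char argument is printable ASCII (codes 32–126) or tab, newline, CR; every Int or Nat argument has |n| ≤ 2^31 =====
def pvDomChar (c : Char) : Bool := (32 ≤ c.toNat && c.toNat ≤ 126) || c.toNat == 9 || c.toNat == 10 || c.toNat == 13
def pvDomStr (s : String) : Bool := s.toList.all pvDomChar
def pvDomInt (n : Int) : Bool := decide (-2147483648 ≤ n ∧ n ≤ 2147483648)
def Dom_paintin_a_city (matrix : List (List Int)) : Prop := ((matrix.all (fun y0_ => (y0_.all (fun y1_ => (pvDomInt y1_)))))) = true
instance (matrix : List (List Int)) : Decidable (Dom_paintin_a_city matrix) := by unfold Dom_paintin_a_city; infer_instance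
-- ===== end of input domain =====

-- B replaces A's four column/row list-building passes by one per-cell pass that sums the four
-- directional exposed faces of each cell (equivalence is about the return value only: A reverses
-- each row of its argument in place, B does not mutate its argument).


-- ===== PORT A =====
-- A's inner loop 'for indexe in range(len(x)-1): if x[indexe] < x[indexe+1]: out.append(diff)'
def pvScanIncs (x : List Int) (acc : List Int) : List Int :=
  (PySem.List.pyRange 0 ((x.length : Int) - 1) 1).foldl (fun acc idx =>
    if PySem.List.pyGetD x idx 0 < PySem.List.pyGetD x (idx + 1) 0 then
      acc ++ [PySem.List.pyGetD x (idx + 1) 0 - PySem.List.pyGetD x idx 0]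
    else acc) acc

def pvSidePass (matrix : List (List Int)) (m : Int) : List Int :=
  (PySem.List.pyRange 0 m 1).foldl (fun acc i =>
    let x := matrix.map (fun line => PySem.List.pyGetD line i 0)
    pvScanIncs x (acc ++ [PySem.List.pyGetD x 0 0])) []

def pvOtherPass (matrix : List (List Int)) (m : Int) : List Int :=
  (PySem.List.pyRange 0 m 1).foldl (fun acc i =>
    let x := (matrix.map (fun line => PySem.List.pyGetD line i 0)).reverse
    pvScanIncs x (acc ++ [PySem.List.pyGetD x 0 0])) []

def pvFrontPass (matrix : List (List Int)) : List Int :=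
  matrix.foldl (fun acc line => pvScanIncs line (acc ++ [PySem.List.pyGetD line 0 0])) []

def pvBackPass (matrix : List (List Int)) : List Int :=
  matrix.foldl (fun acc line =>
    let l := line.reverse
    pvScanIncs l (acc ++ [PySem.List.pyGetD l 0 0])) []

def paintin_a_city (matrix : List (List Int)) : Int :=
  let n : Int := matrix.length
  let m : Int := (PySem.List.pyGetD matrix 0 []).length
  let floor_rooft := (n * m) * 2
  let side := pvSidePass matrix m
  let otherside := pvOtherPass matrix m
  let front := pvFrontPass matrix
  let back := pvBackPass matrix
  side.sum + otherside.sum + front.sum + back.sum + floor_rooft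

-- ===== PORT B =====
-- one cell's four directional faces: raw height at a grid boundary, clamped difference inside
def pvCell (matrix : List (List Int)) (n m r c : Int) : Int :=
  let get := fun (r c : Int) => PySem.List.pyGetD (PySem.List.pyGetD matrix r []) c 0
  let h := get r c
  (if c = 0 then h else max 0 (h - get r (c - 1))) +
  ((if c = m - 1 then h else max 0 (h - get r (c + 1))) +
  ((if r = 0 then h else max 0 (h - get (r - 1) c)) +
  (if r = n - 1 then h else max 0 (h - get (r + 1) c))))

def paintin_a_city_alt (matrix : List (List Int)) : Int :=
  let n : Int := matrix.length
  let m : Int := (PySem.List.pyGetD matrix 0 []).length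
  (PySem.List.pyRange 0 n 1).foldl (fun total r =>
    (PySem.List.pyRange 0 m 1).foldl (fun total c => total + pvCell matrix n m r c) total)
    (2 * (n * m))

-- ===== PRECONDITION & SPEC =====
-- Pre_ restricts to nonempty rectangular matrices with nonempty rows — the natural domain of a
-- building-height grid: A raises IndexError when the matrix is empty or some row is shorter than
-- the first row, and non-rectangular input whose later rows are longer (on which A still returns,
-- mixing len(matrix[0]) for the column passes with full row lengths for the row passes) is
-- malformed input for a height grid and is excluded.
def Pre_paintin_a_city (matrix : List (List Int)) : Prop :=
  matrix ≠ [] ∧ matrix.headD [] ≠ [] ∧ ∀ row ∈ matrix, row.length = (matrix.headD []).length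
instance (matrix : List (List Int)) : Decidable (Pre_paintin_a_city matrix) := by
  unfold Pre_paintin_a_city; infer_instance
def pvWitness_paintin_a_city : List (List Int) := [[1, 3], [2, 2]]
def Spec_paintin_a_city (matrix : List (List Int)) (out : Int) : Prop := out = paintin_a_city_alt matrix
instance (matrix : List (List Int)) (out : Int) : Decidable (Spec_paintin_a_city matrix out) := by unfold Spec_paintin_a_city; infer_instance

-- ===== CLAIM (what is proved, stated in full; the proofs are below) =====
def Claim_equal_paintin_a_city : Prop := ∀ (matrix : List (List Int)), Dom_paintin_a_city matrix → Pre_paintin_a_city matrix → Spec_paintin_a_city matrix (paintin_a_city matrix)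

-- ===== LEMMAS AND PROOFS =====

def pvW (x : List Int) (c : Nat) : Int :=
  if c = 0 then x.getD 0 0 else max 0 (x.getD c 0 - x.getD (c - 1) 0)
def pvE (x : List Int) (c : Nat) : Int :=
  if c = x.length - 1 then x.getD c 0 else max 0 (x.getD c 0 - x.getD (c + 1) 0)
def pvChunk (x : List Int) : Int := ∑ c ∈ Finset.range x.length, pvW x c
def pvCol (matrix : List (List Int)) (c : Nat) : List Int :=
  matrix.map (fun line => line.getD c 0)

theorem pv_sum_map_range (n : Nat) (f : Nat → Int) :
    ((List.range n).map f).sum = ∑ k ∈ Finset.range n, f k := rfl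

theorem pv_sum_filter_map (l : List Nat) (p : Nat → Bool) (f : Nat → Int) :
    ((l.filter p).map f).sum = (l.map (fun k => if p k then f k else 0)).sum := by
  induction l with
  | nil => rfl
  | cons a t ih => by_cases h : p a <;> simp [h, ih]

theorem pv_sum_scanIncs (x acc : List Int) :
    (pvScanIncs x acc).sum =
      acc.sum + ∑ k ∈ Finset.range (x.length - 1), max 0 (x.getD (k + 1) 0 - x.getD k 0) := by
  unfold pvScanIncs
  rw [PySem.List.pyRange_one]
  have h1 : ((x.length : Int) - 1 - 0).toNat = x.length - 1 := by omega
  rw [h1, List.foldl_map]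
  have h2 : ∀ (acc : List Int) (k : Nat),
      (if PySem.List.pyGetD x (0 + (k:Int)) 0 < PySem.List.pyGetD x (0 + (k:Int) + 1) 0 then
        acc ++ [PySem.List.pyGetD x (0 + (k:Int) + 1) 0 - PySem.List.pyGetD x (0 + (k:Int)) 0]
      else acc)
      = (if x.getD k 0 < x.getD (k+1) 0 then acc ++ [x.getD (k+1) 0 - x.getD k 0] else acc) := by
    intro acc k
    rw [show (0 + (k:Int) + 1) = ((k+1 : Nat) : Int) by push_cast; ring,
        show (0 + (k:Int)) = ((k : Nat) : Int) from by omega,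
        PySem.List.pyGetD_natCast, PySem.List.pyGetD_natCast]
  simp only [h2]
  rw [PySem.List.foldl_append_ite (p := fun k => x.getD k 0 < x.getD (k+1) 0)
      (f := fun k => x.getD (k+1) 0 - x.getD k 0)]
  rw [List.sum_append, pv_sum_filter_map, pv_sum_map_range]
  congr 1
  apply Finset.sum_congr rfl
  intro k _
  by_cases h : x.getD k 0 < x.getD (k+1) 0
  · simp only [h, decide_true, if_true]
    rw [max_eq_right (by omega)]
  · rw [max_eq_left (by omega)]
    simp only [List.getD_eq_getElem?_getD] at h
    simp [h]

theorem pv_chunk_head (x : List Int) (hx : x ≠ []) :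
    pvChunk x = x.getD 0 0 + ∑ k ∈ Finset.range (x.length - 1), max 0 (x.getD (k + 1) 0 - x.getD k 0) := by
  have hl : x.length = (x.length - 1) + 1 := by
    have := List.length_pos_of_ne_nil hx; omega
  have h0 : ∑ c ∈ Finset.range x.length, pvW x c = ∑ c ∈ Finset.range ((x.length - 1) + 1), pvW x c := by
    rw [← hl]
  have h1 : ∀ k, pvW x (k + 1) = max 0 (x.getD (k + 1) 0 - x.getD k 0) := by
    intro k; simp [pvW]
  rw [pvChunk, h0, Finset.sum_range_succ',
      show pvW x 0 = x.getD 0 0 from by simp [pvW],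
      Finset.sum_congr rfl (fun k _ => h1 k)]
  ring

theorem pv_getD_reverse (x : List Int) (k : Nat) (hk : k < x.length) :
    x.reverse.getD k 0 = x.getD (x.length - 1 - k) 0 := by
  rw [List.getD_eq_getElem _ _ (by simpa using hk), List.getElem_reverse,
      List.getD_eq_getElem _ _ (by omega)]

theorem pv_sumE_eq_chunk_reverse (x : List Int) (hx : x ≠ []) :
    ∑ c ∈ Finset.range x.length, pvE x c = pvChunk x.reverse := by
  have hpos := List.length_pos_of_ne_nil hx
  rw [pvChunk, List.length_reverse]
  conv_rhs => rw [← Finset.sum_range_reflect]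
  apply Finset.sum_congr rfl
  intro j hj
  rw [Finset.mem_range] at hj
  by_cases hlast : j = x.length - 1
  · rw [pvE, if_pos hlast, pvW, if_pos (by omega),
        pv_getD_reverse x 0 (by omega), show x.length - 1 - 0 = x.length - 1 from rfl, ← hlast]
  · rw [pvE, if_neg hlast, pvW, if_neg (by omega),
        pv_getD_reverse x _ (by omega), pv_getD_reverse x _ (by omega),
        show x.length - 1 - (x.length - 1 - j) = j from by omega,
        show x.length - 1 - (x.length - 1 - j - 1) = j + 1 from by omega]

theorem pv_getD_int (M : List (List Int)) (i j : Nat) :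
    PySem.List.pyGetD (PySem.List.pyGetD M (i : Int) []) (j : Int) 0 = (M.getD i []).getD j 0 := by
  simp [PySem.List.pyGetD_natCast, List.getD_eq_getElem?_getD]

theorem pv_colD (M : List (List Int)) (i j : Nat) (hi : i < M.length) :
    (pvCol M j).getD i 0 = (M.getD i []).getD j 0 := by
  rw [pvCol, List.getD_eq_getElem _ _ (by simpa using hi), List.getElem_map,
      List.getD_eq_getElem _ _ hi]

theorem pv_cell_split (M : List (List Int)) (r c : Nat) (hr : r < M.length)
    (hc : c < (M.headD []).length)
    (hrect : ∀ row ∈ M, row.length = (M.headD []).length) :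
    pvCell M (M.length : Int) (((M.headD []).length : Nat) : Int) (r : Int) (c : Int)
      = (pvW (M.getD r []) c + pvE (M.getD r []) c) + (pvW (pvCol M c) r + pvE (pvCol M c) r) := by
  have hrowmem : M.getD r [] ∈ M := by
    rw [List.getD_eq_getElem _ _ hr]; exact List.getElem_mem hr
  have hrowlen : (M.getD r []).length = (M.headD []).length := hrect _ hrowmem
  have hcollen : (pvCol M c).length = M.length := by simp [pvCol]
  simp only [pvCell]
  have e1 : (if (c : Int) = 0 then PySem.List.pyGetD (PySem.List.pyGetD M (r:Int) []) (c:Int) 0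
        else max 0 (PySem.List.pyGetD (PySem.List.pyGetD M (r:Int) []) (c:Int) 0 -
          PySem.List.pyGetD (PySem.List.pyGetD M (r:Int) []) ((c:Int) - 1) 0))
      = pvW (M.getD r []) c := by
    by_cases h0 : c = 0
    · rw [if_pos (by exact_mod_cast h0), pv_getD_int, pvW, if_pos h0, h0]
    · rw [if_neg (by exact_mod_cast h0), pvW, if_neg h0,
          show ((c:Int) - 1) = ((c - 1 : Nat) : Int) from by omega,
          pv_getD_int, pv_getD_int]
  have e2 : (if (c : Int) = ((M.headD []).length : Int) - 1 then
          PySem.List.pyGetD (PySem.List.pyGetD M (r:Int) []) (c:Int) 0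
        else max 0 (PySem.List.pyGetD (PySem.List.pyGetD M (r:Int) []) (c:Int) 0 -
          PySem.List.pyGetD (PySem.List.pyGetD M (r:Int) []) ((c:Int) + 1) 0))
      = pvE (M.getD r []) c := by
    by_cases hl : c = (M.headD []).length - 1
    · rw [if_pos (by omega), pvE, if_pos (by omega), pv_getD_int]
    · rw [if_neg (by omega), pvE, if_neg (by omega),
          show ((c:Int) + 1) = ((c + 1 : Nat) : Int) from by omega,
          pv_getD_int, pv_getD_int]
  have e3 : (if (r : Int) = 0 then PySem.List.pyGetD (PySem.List.pyGetD M (r:Int) []) (c:Int) 0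
        else max 0 (PySem.List.pyGetD (PySem.List.pyGetD M (r:Int) []) (c:Int) 0 -
          PySem.List.pyGetD (PySem.List.pyGetD M ((r:Int) - 1) []) (c:Int) 0))
      = pvW (pvCol M c) r := by
    by_cases h0 : r = 0
    · rw [if_pos (by exact_mod_cast h0), pv_getD_int, pvW, if_pos h0, h0,
          pv_colD M 0 c (by omega)]
    · rw [if_neg (by exact_mod_cast h0), pvW, if_neg h0,
          show ((r:Int) - 1) = ((r - 1 : Nat) : Int) from by omega,
          pv_getD_int, pv_getD_int, pv_colD M r c hr, pv_colD M (r-1) c (by omega)]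
  have e4 : (if (r : Int) = (M.length : Int) - 1 then
          PySem.List.pyGetD (PySem.List.pyGetD M (r:Int) []) (c:Int) 0
        else max 0 (PySem.List.pyGetD (PySem.List.pyGetD M (r:Int) []) (c:Int) 0 -
          PySem.List.pyGetD (PySem.List.pyGetD M ((r:Int) + 1) []) (c:Int) 0))
      = pvE (pvCol M c) r := by
    by_cases hl : r = M.length - 1
    · rw [if_pos (by omega), pvE, if_pos (by omega), pv_getD_int, pv_colD M r c hr]
    · rw [if_neg (by omega), pvE, if_neg (by omega),
          show ((r:Int) + 1) = ((r + 1 : Nat) : Int) from by omega,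
          pv_getD_int, pv_getD_int, pv_colD M r c hr, pv_colD M (r+1) c (by omega)]
  rw [e1, e2, e3, e4]
  ring

theorem pv_foldl_sum {α : Type} (l : List α) (F : List Int → α → List Int) (g : α → Int)
    (init : List Int) (h : ∀ acc i, i ∈ l → (F acc i).sum = acc.sum + g i) :
    (l.foldl F init).sum = init.sum + (l.map g).sum := by
  induction l generalizing init with
  | nil => simp
  | cons a t ih =>
    simp only [List.foldl_cons, List.map_cons, List.sum_cons]
    rw [ih _ (fun acc i hi => h acc i (List.mem_cons_of_mem _ hi)), h _ _ (List.mem_cons_self)]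
    ring

theorem pv_sum_map_getD {α : Type} (l : List α) (d : α) (f : α → Int) :
    (l.map f).sum = ∑ r ∈ Finset.range l.length, f (l.getD r d) := by
  induction l with
  | nil => simp
  | cons a t ih =>
    rw [List.map_cons, List.sum_cons, List.length_cons, Finset.sum_range_succ']
    simp only [List.getD_cons_succ, List.getD_cons_zero]
    rw [← ih]; ring

theorem pv_step (x : List Int) (hx : x ≠ []) (acc : List Int) :
    (pvScanIncs x (acc ++ [PySem.List.pyGetD x 0 0])).sum = acc.sum + pvChunk x := by
  rw [pv_sum_scanIncs, List.sum_append, pv_chunk_head x hx, PySem.List.pyGetD_zero]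
  simp [List.getD_eq_getElem?_getD]
  ring

theorem pv_map_pyGetD_col (M : List (List Int)) (k : Nat) :
    M.map (fun line => PySem.List.pyGetD line ((k : Nat) : Int) 0) = pvCol M k := by
  simp [pvCol, PySem.List.pyGetD_natCast, List.getD_eq_getElem?_getD]

theorem pv_side_total (M : List (List Int)) (hne : M ≠ []) (m₀ : Nat) :
    (pvSidePass M (m₀ : Int)).sum = ∑ c ∈ Finset.range m₀, pvChunk (pvCol M c) := by
  rw [pvSidePass, PySem.List.pyRange_zero_nat, List.foldl_map]
  rw [pv_foldl_sum _ _ (fun k => pvChunk (pvCol M k)) _ (by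
    intro acc k _
    simp only [pv_map_pyGetD_col M k]
    exact pv_step _ (by simp [pvCol, hne]) acc)]
  simp [pv_sum_map_range]

theorem pv_other_total (M : List (List Int)) (hne : M ≠ []) (m₀ : Nat) :
    (pvOtherPass M (m₀ : Int)).sum = ∑ c ∈ Finset.range m₀, pvChunk (pvCol M c).reverse := by
  rw [pvOtherPass, PySem.List.pyRange_zero_nat, List.foldl_map]
  rw [pv_foldl_sum _ _ (fun k => pvChunk (pvCol M k).reverse) _ (by
    intro acc k _
    simp only [pv_map_pyGetD_col M k]
    exact pv_step _ (by simp [pvCol, hne]) acc)]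
  simp [pv_sum_map_range]

theorem pv_front_total (M : List (List Int)) (h0 : M.headD [] ≠ [])
    (hrect : ∀ row ∈ M, row.length = (M.headD []).length) :
    (pvFrontPass M).sum = ∑ r ∈ Finset.range M.length, pvChunk (M.getD r []) := by
  rw [pvFrontPass]
  rw [pv_foldl_sum _ _ (fun row => pvChunk row) _ (by
    intro acc row hrow
    exact pv_step row (by
      have := hrect row hrow
      have := List.length_pos_of_ne_nil h0
      exact List.ne_nil_of_length_pos (by omega)) acc)]
  rw [pv_sum_map_getD _ []]
  simp

theorem pv_back_total (M : List (List Int)) (h0 : M.headD [] ≠ [])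
    (hrect : ∀ row ∈ M, row.length = (M.headD []).length) :
    (pvBackPass M).sum = ∑ r ∈ Finset.range M.length, pvChunk (M.getD r []).reverse := by
  rw [pvBackPass]
  rw [pv_foldl_sum _ _ (fun row => pvChunk row.reverse) _ (by
    intro acc row hrow
    exact pv_step row.reverse (by
      have := hrect row hrow
      have := List.length_pos_of_ne_nil h0
      exact List.ne_nil_of_length_pos (by simpa using by omega)) acc)]
  rw [pv_sum_map_getD _ []]
  simp

theorem pv_headD (M : List (List Int)) (hne : M ≠ []) :
    PySem.List.pyGetD M 0 [] = M.headD [] := by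
  cases M with
  | nil => simp at hne
  | cons a t => simp [PySem.List.pyGetD_zero_cons]

theorem pv_equal (M : List (List Int)) (hne : M ≠ []) (h0 : M.headD [] ≠ [])
    (hrect : ∀ row ∈ M, row.length = (M.headD []).length) :
    paintin_a_city M = paintin_a_city_alt M := by
  have hm0 : 0 < (M.headD []).length := List.length_pos_of_ne_nil h0
  have hrowlen : ∀ r, r < M.length → (M.getD r []).length = (M.headD []).length := by
    intro r hr
    exact hrect _ (by rw [List.getD_eq_getElem _ _ hr]; exact List.getElem_mem hr)
  have hrowne : ∀ r, r < M.length → M.getD r [] ≠ [] := by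
    intro r hr; have := hrowlen r hr; exact List.ne_nil_of_length_pos (by omega)
  unfold paintin_a_city paintin_a_city_alt
  simp only [pv_headD M hne]
  rw [pv_side_total M hne, pv_other_total M hne, pv_front_total M h0 hrect,
      pv_back_total M h0 hrect]
  simp only [PySem.List.foldl_add, PySem.List.pyRange_zero_nat, List.map_map]
  simp only [pv_sum_map_range, Function.comp]
  rw [Finset.sum_congr rfl (fun r hr => Finset.sum_congr rfl (fun c hc =>
        pv_cell_split M r c (Finset.mem_range.mp hr) (Finset.mem_range.mp hc) hrect))]
  have h1 : ∀ r ∈ Finset.range M.length,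
      ∑ c ∈ Finset.range (M.headD []).length,
        ((pvW (M.getD r []) c + pvE (M.getD r []) c) + (pvW (pvCol M c) r + pvE (pvCol M c) r))
      = (pvChunk (M.getD r []) + pvChunk (M.getD r []).reverse)
        + ∑ c ∈ Finset.range (M.headD []).length, (pvW (pvCol M c) r + pvE (pvCol M c) r) := by
    intro r hr
    have hlen := hrowlen r (Finset.mem_range.mp hr)
    rw [Finset.sum_add_distrib]
    congr 1
    rw [Finset.sum_add_distrib]
    congr 1
    · rw [pvChunk, hlen]
    · rw [← pv_sumE_eq_chunk_reverse _ (hrowne r (Finset.mem_range.mp hr)), hlen]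
  rw [Finset.sum_congr rfl h1, Finset.sum_add_distrib, Finset.sum_comm]
  have h2 : ∀ c ∈ Finset.range (M.headD []).length,
      ∑ r ∈ Finset.range M.length, (pvW (pvCol M c) r + pvE (pvCol M c) r)
      = pvChunk (pvCol M c) + pvChunk (pvCol M c).reverse := by
    intro c hc
    have hclen : (pvCol M c).length = M.length := by simp [pvCol]
    have hcne : pvCol M c ≠ [] := by simp [pvCol, hne]
    rw [Finset.sum_add_distrib]
    congr 1
    · rw [pvChunk, hclen]
    · rw [← pv_sumE_eq_chunk_reverse _ hcne, hclen]
  rw [Finset.sum_congr rfl h2, Finset.sum_add_distrib, Finset.sum_add_distrib]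
  ring

-- ===== VERDICT (by name: the statement is the Claim_ definition above) =====
theorem paintin_a_city_spec : Claim_equal_paintin_a_city := by
  intro matrix _ hpre
  unfold Pre_paintin_a_city at hpre
  obtain ⟨hne, h0, hrect⟩ := hpre
  unfold Spec_paintin_a_city
  exact pv_equal matrix hne h0 hrect
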